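-- pv_equiv track=rewrite | github.com/ryanabelanger/A_Star_Profiler | app.py | divide_map
-- ===== SOURCE A (Python) =====
-- subsection_size = 10
--
-- def divide_map(bmap):
--     section_size = subsection_size
--     sections = {}
--     for x, y in bmap:
--         section_x = x // section_size
--         section_y = y // section_size
--         section = (section_x, section_y)
--         if section not in sections:
--             sections[section] = []
--         sections[section].append((x, y))
--     return sections
-- ===== SOURCE B (Python) =====
-- subsection_size = 10
--
-- def divide_map(bmap):
--     # Two-pass: dedup section keys in first-occurrence order, then one filter per key.
--     keys = []
--     for x, y in bmap:
--         k = (x // subsection_size, y // subsection_size)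
--         if k not in keys:
--             keys.append(k)
--     return {k: [(x, y) for (x, y) in bmap
--                 if (x // subsection_size, y // subsection_size) == k]
--             for k in keys}
-- ===== Notes on version B (the rewrite author's own statement) =====
-- stated objective: alternative
-- what changed: A builds the groups in a single pass that mutates per-key lists inside a dict; B first deduplicates the section keys in first-occurrence order and then builds each group by an independent filter pass over the input, so no dict is mutated during grouping.
import Mathlib
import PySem

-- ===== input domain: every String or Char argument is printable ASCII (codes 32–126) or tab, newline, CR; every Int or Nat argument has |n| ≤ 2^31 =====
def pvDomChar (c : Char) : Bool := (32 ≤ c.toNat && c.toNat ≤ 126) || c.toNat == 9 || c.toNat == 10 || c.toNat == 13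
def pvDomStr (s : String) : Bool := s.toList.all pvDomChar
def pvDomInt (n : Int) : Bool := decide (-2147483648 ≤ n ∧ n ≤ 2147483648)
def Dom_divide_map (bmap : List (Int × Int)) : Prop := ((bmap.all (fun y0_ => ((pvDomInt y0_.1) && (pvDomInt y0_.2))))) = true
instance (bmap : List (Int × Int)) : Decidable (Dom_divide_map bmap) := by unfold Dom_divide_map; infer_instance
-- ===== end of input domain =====

-- B replaces A's single-pass dict-mutating grouping by a dedup-keys-then-filter-per-key two-pass build (alternative decomposition, same results).


-- ===== PORT A =====
def divide_map (bmap : List (Int × Int)) : List (Int × Int × List (Int × Int)) :=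
  let sections : PySem.Dict (Int × Int) (List (Int × Int)) :=
    bmap.foldl (fun d p =>
      let section_x := PySem.Int.floordiv p.1 10
      let section_y := PySem.Int.floordiv p.2 10
      let s := (section_x, section_y)
      let d := if d.contains s then d else d.insert s []
      d.insert s (d.getD s [] ++ [(p.1, p.2)])) PySem.Dict.empty
  -- the returned dict, as its items (key pair flattened into the triple)
  sections.items.map (fun kv => (kv.1.1, kv.1.2, kv.2))

-- ===== PORT B =====
def pvKeyB (p : Int × Int) : Int × Int :=
  (PySem.Int.floordiv p.1 10, PySem.Int.floordiv p.2 10)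

def divide_map_alt (bmap : List (Int × Int)) : List (Int × Int × List (Int × Int)) :=
  let keys := bmap.foldl (fun ks p => if pvKeyB p ∈ ks then ks else ks ++ [pvKeyB p]) []
  keys.map (fun k => (k.1, k.2, bmap.filter (fun p => pvKeyB p == k)))

-- ===== PRECONDITION & SPEC =====
def Spec_divide_map (bmap : List (Int × Int)) (out : List (Int × Int × List (Int × Int))) : Prop := out = divide_map_alt bmap
instance (bmap : List (Int × Int)) (out : List (Int × Int × List (Int × Int))) : Decidable (Spec_divide_map bmap out) := by unfold Spec_divide_map; infer_instance

-- ===== CLAIM (what is proved, stated in full; the proofs are below) =====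
def Claim_equal_divide_map : Prop := ∀ (bmap : List (Int × Int)), Dom_divide_map bmap → Spec_divide_map bmap (divide_map bmap)

-- ===== LEMMAS AND PROOFS =====

-- A's loop body (setdefault-then-append) is a single Dict.modify
theorem stepA_eq_modify (d : PySem.Dict (Int × Int) (List (Int × Int))) (p : Int × Int) :
    (let s := pvKeyB p
     let d' := if d.contains s then d else d.insert s []
     d'.insert s (d'.getD s [] ++ [(p.1, p.2)])) = d.modify (pvKeyB p) [] (· ++ [p]) := by
  by_cases h : d.contains (pvKeyB p)
  · simp [h, PySem.Dict.modify, PySem.Dict.getD_eq_get?_getD]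
  · have h0 : d.contains (pvKeyB p) = false := by simpa using h
    simp [h, PySem.Dict.modify, PySem.Dict.insert_insert_self,
      PySem.Dict.getD_insert_self, PySem.Dict.getD_of_not_contains (h := h0)]

theorem divide_map_eq_modify_loop (bmap : List (Int × Int)) :
    divide_map bmap =
      (bmap.foldl (fun d p => d.modify (pvKeyB p) [] (· ++ [p])) PySem.Dict.empty).items.map
        (fun kv => (kv.1.1, kv.1.2, kv.2)) := by
  unfold divide_map
  have hfold : bmap.foldl (fun d p =>
      let section_x := PySem.Int.floordiv p.1 10
      let section_y := PySem.Int.floordiv p.2 10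
      let s := (section_x, section_y)
      let d := if d.contains s then d else d.insert s []
      d.insert s (d.getD s [] ++ [(p.1, p.2)])) PySem.Dict.empty
      = bmap.foldl (fun d p => d.modify (pvKeyB p) [] (· ++ [p])) PySem.Dict.empty := by
    congr 1
    funext d p
    exact stepA_eq_modify d p
  exact congrArg _ (congrArg _ hfold)

theorem divide_map_spec : Claim_equal_divide_map := by
  intro bmap _
  unfold Spec_divide_map divide_map_alt
  rw [divide_map_eq_modify_loop]
  have hmap : bmap.foldl (fun d p => d.modify (pvKeyB p) [] (· ++ [p])) PySem.Dict.empty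
      = (bmap.map (fun p => (pvKeyB p, p))).foldl
          (fun d q => d.modify q.1 [] (· ++ [q.2])) PySem.Dict.empty := by
    rw [List.foldl_map]
  have hnd : (bmap.foldl (fun d p => d.modify (pvKeyB p) [] (· ++ [p])) PySem.Dict.empty).keys.Nodup := by
    simpa using PySem.Dict.nodup_keys_foldl_modify_key bmap pvKeyB [] (fun _ p => (· ++ [p]))
      PySem.Dict.empty (by simp)
  have hkeys : (bmap.foldl (fun d p => d.modify (pvKeyB p) [] (· ++ [p])) PySem.Dict.empty).keys
      = PySem.Set.ofList (bmap.map pvKeyB) := by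
    have := PySem.Dict.keys_foldl_modify_key (l := bmap) (key := pvKeyB) (d0 := [])
      (f := fun _ p => (· ++ [p])) (d := PySem.Dict.empty)
    simpa [PySem.Set.update_nil_left] using this
  have hget : ∀ c, (bmap.foldl (fun d p => d.modify (pvKeyB p) [] (· ++ [p])) PySem.Dict.empty).getD c []
      = bmap.filter (fun p => pvKeyB p == c) := by
    intro c
    rw [hmap]
    have := PySem.Dict.getD_foldl_modify_append (l := bmap.map (fun p => (pvKeyB p, p)))
      (d := PySem.Dict.empty) (c := c)
    simpa [List.filter_map, Function.comp_def] using this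
  rw [PySem.Dict.items_eq_map_keys _ hnd []]
  rw [hkeys]
  have hbkeys : bmap.foldl (fun ks p => if pvKeyB p ∈ ks then ks else ks ++ [pvKeyB p]) []
      = PySem.Set.ofList (bmap.map pvKeyB) := by
    rw [← PySem.Set.update_nil_left, PySem.Set.update_map_eq_foldl_add]
    congr 1
    funext s b
    exact (PySem.Set.add_eq_ite s (pvKeyB b)).symm
  rw [hbkeys, List.map_map]
  refine List.map_congr_left (fun k _ => ?_)
  simp [hget k]
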